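-- pv_equiv track=rewrite | github.com/ShenglingZHU/hiera-tf | packages/htf-py/htf/coordinator.py | _truthy_windows
-- ===== SOURCE A (Python) =====
-- from collections.abc import Iterable, Mapping, Sequence
-- from typing import Any, Optional
--
-- def _truthy_windows(flags: Sequence[bool], timestamps: Sequence[Any]) -> list[tuple[Any, Any]]:
--     windows: list[tuple[Any, Any]] = []
--     start = None
--     for idx, flag in enumerate(flags):
--         if bool(flag):
--             if start is None:
--                 start = timestamps[idx]
--         else:
--             if start is not None:
--                 end_val = timestamps[idx - 1] if idx > 0 else start
--                 windows.append((start, end_val))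
--                 start = None
--     if start is not None and timestamps:
--         windows.append((start, timestamps[-1]))
--     return windows
-- ===== SOURCE B (Python) =====
-- def _truthy_windows(flags, timestamps):
--     n = len(flags)
--     starts = [i for i in range(n) if flags[i] and (i == 0 or not flags[i - 1])]
--     ends = [i for i in range(n) if flags[i] and (i == n - 1 or not flags[i + 1])]
--     return [(timestamps[s], timestamps[e]) for s, e in zip(starts, ends)]
-- ===== Notes on version B (the rewrite author's own statement) =====
-- stated objective: alternative
-- what changed: Replaces the stateful single-pass start/sentinel run tracker with three stateless staged passes: one comprehension collecting run-start indices (truthy with non-truthy predecessor), one collecting run-end indices (truthy with non-truthy successor), then a zip mapping both index lists to timestamp windows.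
-- outside the precondition, e.g. on _truthy_windows([True], [5, 6]): A returns [(5, 6)], B returns [(5, 5)]; on _truthy_windows([True, True], [5]): A returns [(5, 5)], B raises IndexError
import Mathlib
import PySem

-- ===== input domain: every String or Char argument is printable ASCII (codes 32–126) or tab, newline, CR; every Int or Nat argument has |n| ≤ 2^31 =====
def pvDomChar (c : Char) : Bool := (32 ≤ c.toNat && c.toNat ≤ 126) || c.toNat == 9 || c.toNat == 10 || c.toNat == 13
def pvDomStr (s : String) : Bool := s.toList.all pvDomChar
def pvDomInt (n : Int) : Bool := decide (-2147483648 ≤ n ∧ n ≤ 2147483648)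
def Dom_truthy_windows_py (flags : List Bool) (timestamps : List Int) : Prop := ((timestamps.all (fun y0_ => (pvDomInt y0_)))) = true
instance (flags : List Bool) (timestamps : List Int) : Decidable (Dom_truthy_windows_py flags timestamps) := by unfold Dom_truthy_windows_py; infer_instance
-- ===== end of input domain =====

-- B replaces A's stateful start/sentinel run tracker by three stateless passes: collect run-start
-- indices, collect run-end indices, zip them into timestamp windows (alternative decomposition, same cost).
-- Equivalence is claimed on parallel sequences (see Pre_ below).

-- ===== PORT A =====
-- A's for-loop over enumerate(flags) with state (windows, start), then the final trailing-run append.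
def pvGoA (ts : List Int) : List Bool → Nat → Option Int → List (Int × Int) → List (Int × Int)
  | [], _, start, windows =>
      match start with
      | some s => if ts ≠ [] then windows ++ [(s, PySem.List.pyGetD ts (-1) 0)] else windows
      | none => windows
  | f :: rest, idx, start, windows =>
      if f then
        match start with
        | none => pvGoA ts rest (idx + 1) (some (PySem.List.pyGetD ts (idx : Int) 0)) windows
        | some s => pvGoA ts rest (idx + 1) (some s) windows
      else
        match start with
        | some s =>
            let end_val := if idx > 0 then PySem.List.pyGetD ts ((idx : Int) - 1) 0 else s
            pvGoA ts rest (idx + 1) none (windows ++ [(s, end_val)])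
        | none => pvGoA ts rest (idx + 1) none windows

def truthy_windows_py (flags : List Bool) (timestamps : List Int) : List (Int × Int) :=
  pvGoA timestamps flags 0 none []

-- ===== PORT B =====
-- Source B verbatim: two boundary-detecting comprehensions over range(n), then a zip into windows.
-- (indices are in range wherever they are read, so List.getD is exact for flags[i-1]/flags[i+1],
-- whose out-of-range reads are masked by the short-circuit disjunct exactly as in Python)
def truthy_windows_py_alt (flags : List Bool) (timestamps : List Int) : List (Int × Int) :=
  let n := flags.length
  let starts := (List.range n).filter
    (fun i => flags.getD i false && (decide (i = 0) || !(flags.getD (i - 1) false)))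
  let ends := (List.range n).filter
    (fun i => flags.getD i false && (decide (i = n - 1) || !(flags.getD (i + 1) false)))
  (starts.zip ends).map
    (fun p => (PySem.List.pyGetD timestamps ((p.1 : Nat) : Int) 0,
               PySem.List.pyGetD timestamps ((p.2 : Nat) : Int) 0))

-- ===== PRECONDITION & SPEC =====
-- Pre_ excludes length-mismatched inputs on which A's indexing is accidental: a truthy flag at an
-- index with no timestamp makes A raise IndexError, and a truthy run reaching the end of a flags
-- list shorter than timestamps makes A end the window at timestamps[-1], beyond the flags' range.
def Pre_truthy_windows_py (flags : List Bool) (timestamps : List Int) : Prop :=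
  (∀ k, k < flags.length → flags.getD k false = true → k < timestamps.length) ∧
  (flags.getLast? = some true → flags.length = timestamps.length)
instance (flags : List Bool) (timestamps : List Int) : Decidable (Pre_truthy_windows_py flags timestamps) := by unfold Pre_truthy_windows_py; infer_instance

def pvWitness_truthy_windows_py : List Bool × List Int := ([true, true, false, true], [1, 2, 3, 4])

def Spec_truthy_windows_py (flags : List Bool) (timestamps : List Int) (out : List (Int × Int)) : Prop := out = truthy_windows_py_alt flags timestamps
instance (flags : List Bool) (timestamps : List Int) (out : List (Int × Int)) : Decidable (Spec_truthy_windows_py flags timestamps out) := by unfold Spec_truthy_windows_py; infer_instance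

-- ===== CLAIM (what is proved, stated in full; the proofs are below) =====
def Claim_equal_truthy_windows_py : Prop := ∀ (flags : List Bool) (timestamps : List Int), Dom_truthy_windows_py flags timestamps → Pre_truthy_windows_py flags timestamps → Spec_truthy_windows_py flags timestamps (truthy_windows_py flags timestamps)

-- ===== LEMMAS AND PROOFS =====

-- recursive characterisations of B's two comprehensions: pvS prev l = relative indices i with
-- l[i] truthy and (previous flag, l[i-1] or the carried prev, not truthy); pvE l = relative
-- indices i with l[i] truthy and (i last, or l[i+1] not truthy)
def pvS : Bool → List Bool → List Nat
  | _, [] => []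
  | prev, f :: rest => (if f && !prev then [0] else []) ++ (pvS f rest).map (· + 1)

def pvE : List Bool → List Nat
  | [] => []
  | [f] => if f then [0] else []
  | f :: g :: rest => (if f && !g then [0] else []) ++ (pvE (g :: rest)).map (· + 1)

def pvG (ts : List Int) (p : Nat × Nat) : Int × Int :=
  (PySem.List.pyGetD ts ((p.1 : Nat) : Int) 0, PySem.List.pyGetD ts ((p.2 : Nat) : Int) 0)

-- A's accumulator pulls out
theorem pvGoA_acc (ts : List Int) (l : List Bool) :
    ∀ (idx : Nat) (start : Option Int) (acc : List (Int × Int)),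
      pvGoA ts l idx start acc = acc ++ pvGoA ts l idx start [] := by
  induction l with
  | nil =>
      intro idx start acc
      cases start with
      | none => simp [pvGoA]
      | some s => by_cases h : ts = [] <;> simp [pvGoA, h]
  | cons f rest ih =>
      intro idx start acc
      cases start with
      | none =>
          cases f <;> simp only [pvGoA] <;> [exact ih _ _ _; exact ih _ _ _]
      | some s =>
          cases f
          · simp only [pvGoA]
            rw [ih (idx + 1) none (acc ++ [_])]
            rw [ih (idx + 1) none ([] ++ [_])]
            simp
          · simp only [pvGoA]
            exact ih _ _ _

-- an all-true list ends in a true flag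
theorem pvAllTrue_getLast (l : List Bool) (hall : l.all (fun b => b) = true) (hne : l ≠ []) :
    l.getLast? = some true := by
  induction l with
  | nil => exact absurd rfl hne
  | cons b t ih =>
      cases t with
      | nil => simp at hall; simp [hall]
      | cons c u =>
          rw [List.getLast?_cons_cons]
          simp only [List.all_cons, Bool.and_eq_true] at hall
          exact ih (by simp [hall.2.1, hall.2.2]) (by simp)

-- shifting a (+1)-mapped index list
theorem pvShift (L : List Nat) (a b : Nat) (h : a + 1 = b) :
    (L.map (· + 1)).map (· + a) = L.map (· + b) := by
  subst h
  rw [List.map_map]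
  exact List.map_congr_left (fun x _ => by simp only [Function.comp_apply]; omega)

-- the start-index comprehension equals pvS
theorem pvS_filter (l : List Bool) : ∀ (prev : Bool),
    (List.range l.length).filter
      (fun i => l.getD i false && (if i = 0 then !prev else !(l.getD (i - 1) false))) = pvS prev l := by
  induction l with
  | nil => intro prev; simp [pvS]
  | cons f rest ih =>
      intro prev
      rw [show (f :: rest).length = rest.length + 1 from rfl, List.range_succ_eq_map,
          List.filter_cons, List.filter_map]
      have hfun : ((fun i => (f :: rest).getD i false &&
            (if i = 0 then !prev else !((f :: rest).getD (i - 1) false))) ∘ Nat.succ) =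
          (fun i => rest.getD i false && (if i = 0 then !f else !(rest.getD (i - 1) false))) := by
        funext i
        cases i <;> simp [List.getD]
      rw [hfun, ih f]
      have hsucc : List.map Nat.succ (pvS f rest) = (pvS f rest).map (· + 1) :=
        List.map_congr_left (fun x _ => rfl)
      cases f <;> cases prev <;> simp [pvS, hsucc, List.getD]

-- pvE commutes past a false head
theorem pvE_false (rest : List Bool) : pvE (false :: rest) = (pvE rest).map (· + 1) := by
  cases rest with
  | nil => simp [pvE]
  | cons c u => simp [pvE]

-- the end-index comprehension equals pvE
theorem pvE_filter (l : List Bool) :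
    (List.range l.length).filter
      (fun i => l.getD i false && (decide (i + 1 = l.length) || !(l.getD (i + 1) false))) = pvE l := by
  induction l with
  | nil => simp [pvE]
  | cons f rest ih =>
      rw [show (f :: rest).length = rest.length + 1 from rfl, List.range_succ_eq_map,
          List.filter_cons, List.filter_map]
      have hfun : ((fun i => (f :: rest).getD i false &&
            (decide (i + 1 = rest.length + 1) || !((f :: rest).getD (i + 1) false))) ∘ Nat.succ) =
          (fun i => rest.getD i false && (decide (i + 1 = rest.length) || !(rest.getD (i + 1) false))) := by
        funext i
        simp [List.getD, Nat.succ_inj]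
      rw [hfun, ih]
      cases rest with
      | nil => by_cases hf : f = true <;> simp [pvE, hf]
      | cons c u =>
          have hd : (0 + 1 = (c :: u).length + 1) = False := by simp
          by_cases hfc : (f && !c) = true
          · simp only [List.getD, List.getD_cons_zero, hd, decide_false, Bool.false_or]
            simp [pvE, hfc]
          · simp only [List.getD, List.getD_cons_zero, hd, decide_false, Bool.false_or]
            simp at hfc
            simp only [pvE]
            by_cases hf : f = true
            · simp [hf, hfc hf]
            · simp [hf]

-- pvE of a list beginning true is nonempty (the open run has an end)
theorem pvE_true_exists (l : List Bool) : ∃ e es, pvE (true :: l) = e :: es := by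
  induction l with
  | nil => exact ⟨0, [], rfl⟩
  | cons c u ih =>
      cases c with
      | false => exact ⟨0, _, rfl⟩
      | true =>
          obtain ⟨e, es, h⟩ := ih
          exact ⟨e + 1, es.map (· + 1), by simp [pvE, h]⟩

-- the simultaneous invariant: part 1 relates A's loop with start=None to the zipped boundary
-- lists of the suffix; part 2 relates the open-window state to pvE (true :: suffix)
theorem pvMain (ts : List Int) (l : List Bool) :
    (∀ idx : Nat, (l.getLast? = some true → idx + l.length = ts.length) →
      pvGoA ts l idx none [] =
        (((pvS false l).map (· + idx)).zip ((pvE l).map (· + idx))).map (pvG ts))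
    ∧
    (∀ (j : Nat) (s : Int) (e : Nat) (es : List Nat),
        (l.getLast? = some true → (j + 1) + l.length = ts.length) →
        (l.all (fun b => b) = true → (j + 1) + l.length = ts.length) →
        pvE (true :: l) = e :: es →
        pvGoA ts l (j + 1) (some s) [] =
          (s, PySem.List.pyGetD ts ((e + j : Nat) : Int) 0) ::
            (((pvS true l).map (· + (j + 1))).zip (es.map (· + j))).map (pvG ts)) := by
  induction l with
  | nil =>
      constructor
      · intro idx _; simp [pvGoA, pvS, pvE]
      · intro j s e es _ h3 hE
        have hlen : j + 1 = ts.length := by simpa using h3 (by simp)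
        have hts : ts ≠ [] := by intro h; rw [h] at hlen; simp at hlen
        rw [show pvE [true] = [0] from rfl] at hE
        injection hE with hx hy
        subst hx; subst hy
        have hj : j = ts.length - 1 := by omega
        subst hj
        have hpos : 0 < ts.length := by
          cases ts with
          | nil => exact absurd rfl hts
          | cons a b => simp
        have ha : PySem.List.pyGetD ts (-1) 0 = ts.getLast hts := PySem.List.pyGetD_neg_one ts 0 hts
        have hb : PySem.List.pyGetD ts ((0 + (ts.length - 1) : Nat) : Int) 0 = ts.getD (ts.length - 1) 0 := by
          simpa using PySem.List.pyGetD_natCast ts (ts.length - 1) 0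
        simp only [pvGoA, hts, ne_eq, not_false_eq_true, if_true, List.nil_append]
        rw [ha, hb, List.getLast_eq_getElem, List.getD_eq_getElem ts 0 (by omega)]
        simp [pvS]
  | cons f rest ih =>
      constructor
      · -- start = None
        intro idx h1
        cases f with
        | false =>
            have hrec := ih.1 (idx + 1) (fun hgl => by
              cases rest with
              | nil => simp at hgl
              | cons c u =>
                  have := h1 (by rw [List.getLast?_cons_cons]; exact hgl)
                  simp at this ⊢; omega)
            have hS : pvS false (false :: rest) = (pvS false rest).map (· + 1) := by
              simp [pvS]
            simp only [pvGoA, Bool.false_eq_true, if_false]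
            rw [hrec, hS, pvE_false rest,
                pvShift (pvS false rest) idx (idx + 1) rfl,
                pvShift (pvE rest) idx (idx + 1) rfl]
        | true =>
            obtain ⟨e, es, hE⟩ := pvE_true_exists rest
            have hrec := ih.2 idx (PySem.List.pyGetD ts (idx : Int) 0) e es
              (fun hgl => by
                cases rest with
                | nil => simp at hgl
                | cons c u =>
                    have := h1 (by rw [List.getLast?_cons_cons]; exact hgl)
                    simp at this ⊢; omega)
              (fun hall => by
                have hgl : (true :: rest).getLast? = some true := by
                  cases rest with
                  | nil => simp
                  | cons c u =>
                      rw [List.getLast?_cons_cons]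
                      exact pvAllTrue_getLast (c :: u) hall (by simp)
                have := h1 hgl
                simp at this ⊢; omega)
              hE
            have hS2 : pvS false (true :: rest) = 0 :: (pvS true rest).map (· + 1) := by
              simp [pvS]
            simp only [pvGoA, if_true]
            rw [hrec, hS2, hE]
            simp only [List.map_cons, List.zip_cons_cons]
            rw [pvShift (pvS true rest) idx (idx + 1) rfl]
            simp [pvG]
      · -- start = some s, absolute index j + 1
        intro j s e es h2 h3 hE
        cases f with
        | false =>
            -- the window closes: A emits (s, ts[j]); B's head end is relative 0 in pvE (true::false::rest)
            have hL := ih.1 (j + 2) (fun hgl => by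
              cases rest with
              | nil => simp at hgl
              | cons c u =>
                  have := h2 (by rw [List.getLast?_cons_cons]; exact hgl)
                  simp at this ⊢; omega)
            have hshape : pvE (true :: false :: rest) = 0 :: ((pvE rest).map (· + 1)).map (· + 1) := by
              simp [pvE, pvE_false rest]
            rw [hshape] at hE
            injection hE with hx hy
            subst hx; subst hy
            have hS3 : pvS true (false :: rest) = (pvS false rest).map (· + 1) := by
              simp [pvS]
            simp only [pvGoA, Bool.false_eq_true, if_false]
            rw [pvGoA_acc]
            have hcast : ((j + 1 : Nat) : Int) - 1 = ((j : Nat) : Int) := by push_cast; ring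
            simp only [gt_iff_lt, Nat.succ_pos, if_pos, hcast]
            rw [hL, hS3,
                pvShift (pvS false rest) (j + 1) (j + 2) rfl,
                pvShift ((pvE rest).map (· + 1)) j (j + 1) rfl,
                pvShift (pvE rest) (j + 1) (j + 2) rfl]
            simp
        | true =>
            -- the run continues
            obtain ⟨e', es', hE'⟩ := pvE_true_exists rest
            have hshape : pvE (true :: true :: rest) = (e' + 1) :: es'.map (· + 1) := by
              simp [pvE, hE']
            rw [hshape] at hE
            injection hE with hx hy
            subst hx; subst hy
            have hQ := ih.2 (j + 1) s e' es'
              (fun hgl => by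
                cases rest with
                | nil => simp at hgl
                | cons c u =>
                    have := h2 (by rw [List.getLast?_cons_cons]; exact hgl)
                    simp at this ⊢; omega)
              (fun hall => by
                have := h3 (by simpa using hall)
                simp at this ⊢; omega)
              hE'
            have hS4 : pvS true (true :: rest) = (pvS true rest).map (· + 1) := by
              simp [pvS]
            simp only [pvGoA, if_true]
            rw [hQ, hS4,
                pvShift (pvS true rest) (j + 1) (j + 1 + 1) rfl,
                pvShift es' j (j + 1) rfl,
                show e' + 1 + j = e' + (j + 1) from by omega]

-- ===== VERDICT (by name: the statement is the Claim_ definition above) =====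
theorem truthy_windows_py_spec : Claim_equal_truthy_windows_py := by
  intro flags ts _ hpre
  obtain ⟨h1, h2⟩ := hpre
  unfold Spec_truthy_windows_py truthy_windows_py truthy_windows_py_alt
  have hA := (pvMain ts flags).1 0 (fun hgl => by have := h2 hgl; omega)
  rw [hA]
  -- rewrite B's comprehensions to pvS / pvE
  have hs : (List.range flags.length).filter
      (fun i => flags.getD i false && (decide (i = 0) || !(flags.getD (i - 1) false))) =
      pvS false flags := by
    rw [← pvS_filter flags false]
    apply List.filter_congr
    intro i _
    by_cases h : i = 0 <;> simp [h]
  have he : (List.range flags.length).filter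
      (fun i => flags.getD i false && (decide (i = flags.length - 1) || !(flags.getD (i + 1) false))) =
      pvE flags := by
    rw [← pvE_filter flags]
    apply List.filter_congr
    intro i hi
    rw [List.mem_range] at hi
    have hb : decide (i = flags.length - 1) = decide (i + 1 = flags.length) := by
      rw [decide_eq_decide]; omega
    rw [hb]
  have hz : ∀ (L : List Nat), L.map (· + 0) = L := fun L => by simp
  rw [hz (pvS false flags), hz (pvE flags)]
  show List.map (pvG ts) ((pvS false flags).zip (pvE flags)) =
      (((List.range flags.length).filter
          (fun i => flags.getD i false && (decide (i = 0) || !(flags.getD (i - 1) false)))).zip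
        ((List.range flags.length).filter
          (fun i => flags.getD i false && (decide (i = flags.length - 1) || !(flags.getD (i + 1) false))))).map
        (fun p => (PySem.List.pyGetD ts ((p.1 : Nat) : Int) 0,
                   PySem.List.pyGetD ts ((p.2 : Nat) : Int) 0))
  rw [hs, he]
  rfl
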